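-- pv_equiv track=rewrite | github.com/willchristophersander/NARegionalAccents | scripts/comma_story_extractor.py | find_story_boundaries
-- ===== SOURCE A (Python) =====
-- from typing import List, Dict, Tuple, Optional
--
-- def find_story_boundaries(segments: List[Dict], text: str) -> Tuple[Optional[int], Optional[int]]:
--     """Find the start and end boundaries of the comma story in the segments."""
--     # Look for the story start
--     start_segment = None
--     end_segment = None
--
--     for i, segment in enumerate(segments):
--         segment_text = segment.get('text', '').lower()
--
--         # Look for story start indicators
--         if start_segment is None:
--             if any(phrase in segment_text for phrase in [
--                 "here's a story for you",
--                 "sarah perry",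
--                 "veterinary nurse",
--                 "old zoo"
--             ]):
--                 start_segment = i
--                 continue
--
--         # Look for story end indicators
--         if start_segment is not None and end_segment is None:
--             if any(phrase in segment_text for phrase in [
--                 "can't imagine paying so much",
--                 "i can't imagine paying",
--                 "paying so much",
--                 "millionaire lawyer"
--             ]):
--                 end_segment = i
--                 break
--
--     return start_segment, end_segment
-- ===== SOURCE B (Python) =====
-- from typing import List, Dict, Tuple, Optional
--
-- START_PHRASES = [
--     "here's a story for you",
--     "sarah perry",
--     "veterinary nurse",
--     "old zoo",
-- ]
--
-- END_PHRASES = [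
--     "can't imagine paying so much",
--     "i can't imagine paying",
--     "paying so much",
--     "millionaire lawyer",
-- ]
--
--
-- def _first_match(segments: List[Dict], phrases: List[str], offset: int) -> Optional[int]:
--     """Index (plus offset) of the first segment whose text contains any phrase."""
--     for i, segment in enumerate(segments):
--         t = segment.get('text', '').lower()
--         if any(p in t for p in phrases):
--             return offset + i
--     return None
--
--
-- def find_story_boundaries(segments: List[Dict], text: str) -> Tuple[Optional[int], Optional[int]]:
--     """Find the start and end boundaries of the comma story in the segments."""
--     start = _first_match(segments, START_PHRASES, 0)
--     if start is None:
--         return None, None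
--     end = _first_match(segments[start + 1:], END_PHRASES, start + 1)
--     return start, end
-- ===== Notes on version B (the rewrite author's own statement) =====
-- stated objective: simpler
-- what changed: Replaces the single stateful loop with continue/break and two mode flags by two independent first-match searches: one pass for the start phrase, then a second pass over the tail segments[start+1:] for the end phrase.
import Mathlib
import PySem

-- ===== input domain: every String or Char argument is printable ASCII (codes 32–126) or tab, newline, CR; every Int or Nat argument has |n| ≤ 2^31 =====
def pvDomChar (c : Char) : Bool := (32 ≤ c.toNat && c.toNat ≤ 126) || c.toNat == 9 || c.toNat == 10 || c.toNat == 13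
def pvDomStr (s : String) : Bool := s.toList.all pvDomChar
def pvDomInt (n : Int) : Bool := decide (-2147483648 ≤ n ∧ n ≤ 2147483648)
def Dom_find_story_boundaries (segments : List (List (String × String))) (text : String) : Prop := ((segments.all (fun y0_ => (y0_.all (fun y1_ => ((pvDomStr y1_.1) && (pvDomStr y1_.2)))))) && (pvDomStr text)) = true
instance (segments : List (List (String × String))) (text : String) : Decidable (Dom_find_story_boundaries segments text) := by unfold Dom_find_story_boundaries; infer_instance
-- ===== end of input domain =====

-- B replaces A's single stateful loop (mode flags, continue/break) by two independent
-- first-match searches: start in segments, then end in segments[start+1:]. Objective: simpler.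

-- shared phrase constants and per-segment text extraction (seg.get('text','').lower())
def pvStartPhrases : List String :=
  ["here's a story for you", "sarah perry", "veterinary nurse", "old zoo"]

def pvEndPhrases : List String :=
  ["can't imagine paying so much", "i can't imagine paying", "paying so much", "millionaire lawyer"]

def pvSegText (seg : List (String × String)) : String :=
  PySem.Str.lower (PySem.Dict.getD (PySem.Dict.mk seg) "text" "")

-- any(phrase in t for phrase in phrases)
def pvHasAny (phrases : List String) (t : String) : Bool :=
  phrases.any (fun p => PySem.Str.isIn p t)

-- ===== PORT A =====
-- A's for-loop over enumerate(segments) with state start_segment (end found => break returns immediately)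
def pvLoopA : List (List (String × String)) → Int → Option Int → Option Int × Option Int
  | [], _, start => (start, none)
  | seg :: rest, i, none =>
    if pvHasAny pvStartPhrases (pvSegText seg) then pvLoopA rest (i + 1) (some i)
    else pvLoopA rest (i + 1) none
  | seg :: rest, i, some s =>
    if pvHasAny pvEndPhrases (pvSegText seg) then (some s, some i)
    else pvLoopA rest (i + 1) (some s)

def find_story_boundaries (segments : List (List (String × String))) (text : String) : Option Int × Option Int :=
  pvLoopA segments 0 none

-- ===== PORT B =====
-- _first_match(segments, phrases, offset)
def pvFirstMatch : List (List (String × String)) → List String → Int → Option Int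
  | [], _, _ => none
  | seg :: rest, phrases, off =>
    if pvHasAny phrases (pvSegText seg) then some off
    else pvFirstMatch rest phrases (off + 1)

def find_story_boundaries_alt (segments : List (List (String × String))) (text : String) : Option Int × Option Int :=
  match pvFirstMatch segments pvStartPhrases 0 with
  | none => (none, none)
  | some s =>
    (some s, pvFirstMatch (PySem.List.slice segments (some (s + 1)) none) pvEndPhrases (s + 1))

-- ===== PRECONDITION & SPEC =====
def Spec_find_story_boundaries (segments : List (List (String × String))) (text : String) (out : Option Int × Option Int) : Prop := out = find_story_boundaries_alt segments text
instance (segments : List (List (String × String))) (text : String) (out : Option Int × Option Int) : Decidable (Spec_find_story_boundaries segments text out) := by unfold Spec_find_story_boundaries; infer_instance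

-- ===== CLAIM (what is proved, stated in full; the proofs are below) =====
def Claim_equal_find_story_boundaries : Prop := ∀ (segments : List (List (String × String))) (text : String), Dom_find_story_boundaries segments text → Spec_find_story_boundaries segments text (find_story_boundaries segments text)

-- ===== LEMMAS AND PROOFS =====

theorem pvFirstMatch_ge {segs : List (List (String × String))} {ph : List String} {i s : Int}
    (h : pvFirstMatch segs ph i = some s) : i ≤ s := by
  induction segs generalizing i with
  | nil => simp [pvFirstMatch] at h
  | cons seg rest ih =>
    unfold pvFirstMatch at h
    split at h
    · simp at h; omega
    · have := ih h; omega

theorem pvLoopA_some (segs : List (List (String × String))) (i s : Int) :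
    pvLoopA segs i (some s) = (some s, pvFirstMatch segs pvEndPhrases i) := by
  induction segs generalizing i with
  | nil => simp [pvLoopA, pvFirstMatch]
  | cons seg rest ih =>
    simp only [pvLoopA, pvFirstMatch]
    split <;> simp [ih]

theorem pvLoopA_none (segs : List (List (String × String))) (i : Int) :
    pvLoopA segs i none =
      match pvFirstMatch segs pvStartPhrases i with
      | none => (none, none)
      | some s => (some s, pvFirstMatch (segs.drop ((s - i).toNat + 1)) pvEndPhrases (s + 1)) := by
  induction segs generalizing i with
  | nil => simp [pvLoopA, pvFirstMatch]
  | cons seg rest ih =>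
    simp only [pvLoopA, pvFirstMatch]
    by_cases hm : pvHasAny pvStartPhrases (pvSegText seg) = true
    · have h1 : (i - i).toNat + 1 = 1 := by omega
      simp only [hm, if_pos, pvLoopA_some, h1, List.drop_one, List.tail_cons]
    · rw [if_neg hm, if_neg hm, ih (i + 1)]
      cases hfm : pvFirstMatch rest pvStartPhrases (i + 1) with
      | none => simp
      | some s =>
        have hge : i + 1 ≤ s := pvFirstMatch_ge hfm
        have h2 : (s - i).toNat + 1 = ((s - (i + 1)).toNat + 1) + 1 := by omega
        simp [h2]

-- ===== VERDICT (by name: the statement is the Claim_ definition above) =====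
theorem find_story_boundaries_spec : Claim_equal_find_story_boundaries := by
  intro segments text _
  unfold Spec_find_story_boundaries find_story_boundaries find_story_boundaries_alt
  rw [pvLoopA_none]
  cases hfm : pvFirstMatch segments pvStartPhrases 0 with
  | none => simp
  | some s =>
    have hge : (0 : Int) ≤ s := pvFirstMatch_ge hfm
    have h : (s + 1).toNat = (s - 0).toNat + 1 := by omega
    simp only [PySem.List.slice_from segments (by omega : (0 : Int) ≤ s + 1), h]
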